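-- pv_equiv track=rewrite | github.com/Nico7522/dokkan_ost_full | feed_api/feed.py | get_type_class
-- ===== SOURCE A (Python) =====
-- def get_type_class(element: int):
--     elements = {
--         "10": "Super AGL",
--         '11': "Super TEQ",
--         "12": "Super INT",
--         "13": "Super STR",
--         "14": "Super PHY",
--         "20": "Extreme AGL",
--         "21": "Extreme TEQ",
--         "22": "Extreme INT",
--         "23": "Extreme STR",
--         "24": "Extreme PHY"
--     }
--     for el in elements:
--         if int(el) == element:
--             return elements[el]
-- ===== SOURCE B (Python) =====
-- def get_type_class(element: int):
--     prefixes = {1: "Super", 2: "Extreme"}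
--     suffixes = {0: "AGL", 1: "TEQ", 2: "INT", 3: "STR", 4: "PHY"}
--     tens, ones = divmod(element, 10)
--     if tens in prefixes and ones in suffixes:
--         return f"{prefixes[tens]} {suffixes[ones]}"
--     return None
-- ===== Notes on version B (the rewrite author's own statement) =====
-- stated objective: simpler
-- what changed: Replaces the 10-entry string-keyed dict scan (with int() on each key) by an arithmetic divmod(element,10) split into a 2-entry prefix table and a 5-entry suffix table.
import Mathlib
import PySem

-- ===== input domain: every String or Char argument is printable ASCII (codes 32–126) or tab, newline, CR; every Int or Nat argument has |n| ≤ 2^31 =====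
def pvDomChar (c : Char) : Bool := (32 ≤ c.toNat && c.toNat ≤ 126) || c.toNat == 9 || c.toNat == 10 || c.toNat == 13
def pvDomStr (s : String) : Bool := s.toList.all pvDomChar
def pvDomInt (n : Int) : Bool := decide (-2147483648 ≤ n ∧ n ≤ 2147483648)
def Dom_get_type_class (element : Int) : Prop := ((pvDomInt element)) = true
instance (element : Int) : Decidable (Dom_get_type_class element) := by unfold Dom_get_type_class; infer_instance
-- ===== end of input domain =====

-- B replaces A's 10-entry string-keyed dict scan by a divmod(element,10) split into two small dicts (simpler).


-- ===== PORT A =====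
-- 'for el in elements: if int(el) == element: return elements[el]' over the literal dict's keys
def getTypeClassLoop (items : List (String × String)) (element : Int) : Option String :=
  match items with
  | [] => none
  | (k, v) :: rest =>
      if PySem.Int.ofStr? k = some element then some v else getTypeClassLoop rest element

def get_type_class (element : Int) : Option String :=
  let elements : PySem.Dict String String := PySem.Dict.ofList
    [("10", "Super AGL"), ("11", "Super TEQ"), ("12", "Super INT"), ("13", "Super STR"),
     ("14", "Super PHY"), ("20", "Extreme AGL"), ("21", "Extreme TEQ"), ("22", "Extreme INT"),
     ("23", "Extreme STR"), ("24", "Extreme PHY")]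
  getTypeClassLoop elements.items element

-- ===== PORT B =====
def get_type_class_alt (element : Int) : Option String :=
  let prefixes : PySem.Dict Int String := PySem.Dict.ofList [(1, "Super"), (2, "Extreme")]
  let suffixes : PySem.Dict Int String := PySem.Dict.ofList
    [(0, "AGL"), (1, "TEQ"), (2, "INT"), (3, "STR"), (4, "PHY")]
  let tens := PySem.Int.floordiv element 10
  let ones := PySem.Int.mod element 10
  if prefixes.contains tens && suffixes.contains ones then
    match prefixes.get? tens, suffixes.get? ones with
    | some p, some s => some (p ++ " " ++ s)
    | _, _ => none
  else none

-- ===== PRECONDITION & SPEC =====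
def Spec_get_type_class (element : Int) (out : Option String) : Prop := out = get_type_class_alt element
instance (element : Int) (out : Option String) : Decidable (Spec_get_type_class element out) := by unfold Spec_get_type_class; infer_instance

-- ===== CLAIM (what is proved, stated in full; the proofs are below) =====
def Claim_equal_get_type_class : Prop := ∀ (element : Int), Dom_get_type_class element → Spec_get_type_class element (get_type_class element)

-- ===== LEMMAS AND PROOFS =====

-- ===== VERDICT (by name: the statement is the Claim_ definition above) =====
set_option maxHeartbeats 2000000 in
theorem get_type_class_spec : Claim_equal_get_type_class := by
  intro element _
  unfold Spec_get_type_class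
  by_cases h10 : element = 10; · subst h10; decide
  by_cases h11 : element = 11; · subst h11; decide
  by_cases h12 : element = 12; · subst h12; decide
  by_cases h13 : element = 13; · subst h13; decide
  by_cases h14 : element = 14; · subst h14; decide
  by_cases h20 : element = 20; · subst h20; decide
  by_cases h21 : element = 21; · subst h21; decide
  by_cases h22 : element = 22; · subst h22; decide
  by_cases h23 : element = 23; · subst h23; decide
  by_cases h24 : element = 24; · subst h24; decide
  have hA : get_type_class element = none := by
    show getTypeClassLoop _ element = none
    rw [show (PySem.Dict.ofList
      [("10", "Super AGL"), ("11", "Super TEQ"), ("12", "Super INT"), ("13", "Super STR"),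
       ("14", "Super PHY"), ("20", "Extreme AGL"), ("21", "Extreme TEQ"), ("22", "Extreme INT"),
       ("23", "Extreme STR"), ("24", "Extreme PHY")]).items
      = [("10", "Super AGL"), ("11", "Super TEQ"), ("12", "Super INT"), ("13", "Super STR"),
       ("14", "Super PHY"), ("20", "Extreme AGL"), ("21", "Extreme TEQ"), ("22", "Extreme INT"),
       ("23", "Extreme STR"), ("24", "Extreme PHY")] from by decide]
    simp only [getTypeClassLoop, show PySem.Int.ofStr? "10" = some 10 from rfl,
      show PySem.Int.ofStr? "11" = some 11 from rfl, show PySem.Int.ofStr? "12" = some 12 from rfl,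
      show PySem.Int.ofStr? "13" = some 13 from rfl, show PySem.Int.ofStr? "14" = some 14 from rfl,
      show PySem.Int.ofStr? "20" = some 20 from rfl, show PySem.Int.ofStr? "21" = some 21 from rfl,
      show PySem.Int.ofStr? "22" = some 22 from rfl, show PySem.Int.ofStr? "23" = some 23 from rfl,
      show PySem.Int.ofStr? "24" = some 24 from rfl]
    split_ifs <;> simp_all
  have hfm := PySem.Int.floordiv_mul_add_mod element 10
  have hm0 := PySem.Int.mod_nonneg element (b := 10) (by norm_num)
  have hml := PySem.Int.mod_lt element (b := 10) (by norm_num)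
  have hB : get_type_class_alt element = none := by
    by_cases ht : PySem.Int.floordiv element 10 = 1 ∨ PySem.Int.floordiv element 10 = 2
    · have h2 : (PySem.Dict.ofList ([(0, "AGL"), (1, "TEQ"), (2, "INT"), (3, "STR"),
          (4, "PHY")] : List (Int × String))).contains (PySem.Int.mod element 10) = false := by
        rw [show (PySem.Dict.ofList ([(0, "AGL"), (1, "TEQ"), (2, "INT"), (3, "STR"), (4, "PHY")] : List (Int × String)))
            = PySem.Dict.mk [(0, "AGL"), (1, "TEQ"), (2, "INT"), (3, "STR"), (4, "PHY")] from rfl]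
        simp [PySem.Dict.contains_mk]
        omega
      unfold get_type_class_alt
      simp only [h2, Bool.and_false, Bool.false_eq_true, if_false]
    · have h1 : (PySem.Dict.ofList ([(1, "Super"), (2, "Extreme")] : List (Int × String))).contains
          (PySem.Int.floordiv element 10) = false := by
        rw [show (PySem.Dict.ofList ([(1, "Super"), (2, "Extreme")] : List (Int × String)))
            = PySem.Dict.mk [(1, "Super"), (2, "Extreme")] from rfl]
        simp [PySem.Dict.contains_mk]
        omega
      unfold get_type_class_alt
      simp only [h1, Bool.false_and, Bool.false_eq_true, if_false]
  rw [hA, hB]
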